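-- pv_equiv track=rewrite | github.com/orangedeus/processing | process.py | gps_dict_arr2
-- ===== SOURCE A (Python) =====
-- def gps_dict_arr2(gps_track_arr): # Complexity : O(TRACKPOINTS^2)
--     dict_arr = []
--     dict = {}
--     for i in gps_track_arr:
--         if (i.find("GPS Date/Time") != -1):
--             if (dict.get("date/time") != None):
--                 dict_arr.append(dict)
--             dict = {}
--             dict["date/time"] = i.split(": ")[-1]
--         elif (i.find("GPS Latitude") != -1):
--             deg_lat = i.split(": ")[-1]
--             dict["latitude"] = deg_lat
--         elif (i.find("GPS Longitude") != -1):
--             deg_long = i.split(": ")[-1]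
--             dict["longitude"] = deg_long
--         elif (i.find("Altitude") != -1):
--             dict["altitude"] = i.split(": ")[-1]
--         elif (i.find("GPS Speed Ref") != -1):
--             dict["speed_ref"] = i.split(": ")[-1]
--         elif (i.find("GPS Speed") != -1):
--             dict["speed"] = i.split(": ")[-1]
--         elif (i.find("GPS Track Ref") != -1):
--             dict["track_ref"] = i.split(": ")[-1]
--         elif (i.find("GPS Track") != -1):
--             dict["track"] = i.split(": ")[-1]
--     dict_arr.append(dict)
--     return dict_arr
-- ===== SOURCE B (Python) =====
-- def gps_dict_arr2(gps_track_arr):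
--     # Staged decomposition: (1) find the indices of all delimiter lines,
--     # (2) slice the input into one segment per delimiter, (3) parse each
--     # segment independently with an ordered (substring, key) table.
--     fields = [("GPS Date/Time", "date/time"), ("GPS Latitude", "latitude"),
--               ("GPS Longitude", "longitude"), ("Altitude", "altitude"),
--               ("GPS Speed Ref", "speed_ref"), ("GPS Speed", "speed"),
--               ("GPS Track Ref", "track_ref"), ("GPS Track", "track")]
--
--     def parse(segment):
--         d = {}
--         for line in segment:
--             for sub, key in fields:
--                 if sub in line:
--                     d[key] = line.split(": ")[-1]
--                     break
--         return d
--
--     marks = [k for k, line in enumerate(gps_track_arr) if "GPS Date/Time" in line]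
--     if not marks:
--         return [parse(gps_track_arr)]
--     bounds = marks + [len(gps_track_arr)]
--     return [parse(gps_track_arr[a:b]) for a, b in zip(bounds, bounds[1:])]
-- ===== Notes on version B (the rewrite author's own statement) =====
-- stated objective: alternative
-- what changed: A is a single stateful fold that flushes the current dict whenever a delimiter line arrives; B is staged: it first computes the list of indices of all 'GPS Date/Time' lines, then slices the input into one segment per delimiter (zip of consecutive bounds), and parses each segment independently with an ordered (substring, key) table; with no delimiter the whole list is parsed as one record.
import Mathlib
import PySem

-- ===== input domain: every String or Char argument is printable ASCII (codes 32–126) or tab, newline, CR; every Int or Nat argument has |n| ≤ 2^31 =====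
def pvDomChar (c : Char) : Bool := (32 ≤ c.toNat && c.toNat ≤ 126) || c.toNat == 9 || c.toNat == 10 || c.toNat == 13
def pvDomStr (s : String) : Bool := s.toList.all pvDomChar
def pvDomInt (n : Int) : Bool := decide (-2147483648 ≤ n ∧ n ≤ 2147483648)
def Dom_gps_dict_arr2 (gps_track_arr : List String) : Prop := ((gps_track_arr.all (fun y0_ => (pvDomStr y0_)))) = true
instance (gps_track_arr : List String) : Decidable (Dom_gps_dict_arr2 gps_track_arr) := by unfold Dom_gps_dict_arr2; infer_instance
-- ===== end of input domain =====

-- B replaces A's stateful flush-on-delimiter fold by a staged decomposition: compute all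
-- delimiter indices, slice the input into segments between consecutive bounds, parse each
-- segment independently with an ordered field table; same cost.

-- ===== PORT A =====
-- i.split(": ")[-1]  (split(": ") never raises and never returns an empty list, so getD's defaults are unreachable)
def pvLastA (i : String) : String := PySem.List.pyGetD ((PySem.Str.split? i ": ").getD []) (-1) ""

def pvStepA (st : List (PySem.Dict String String) × PySem.Dict String String) (i : String) :
    List (PySem.Dict String String) × PySem.Dict String String :=
  if (PySem.Str.find i "GPS Date/Time" != -1) = true then
    let arr := if st.2.get? "date/time" ≠ none then st.1 ++ [st.2] else st.1
    (arr, PySem.Dict.empty.insert "date/time" (pvLastA i))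
  else if (PySem.Str.find i "GPS Latitude" != -1) = true then (st.1, st.2.insert "latitude" (pvLastA i))
  else if (PySem.Str.find i "GPS Longitude" != -1) = true then (st.1, st.2.insert "longitude" (pvLastA i))
  else if (PySem.Str.find i "Altitude" != -1) = true then (st.1, st.2.insert "altitude" (pvLastA i))
  else if (PySem.Str.find i "GPS Speed Ref" != -1) = true then (st.1, st.2.insert "speed_ref" (pvLastA i))
  else if (PySem.Str.find i "GPS Speed" != -1) = true then (st.1, st.2.insert "speed" (pvLastA i))
  else if (PySem.Str.find i "GPS Track Ref" != -1) = true then (st.1, st.2.insert "track_ref" (pvLastA i))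
  else if (PySem.Str.find i "GPS Track" != -1) = true then (st.1, st.2.insert "track" (pvLastA i))
  else st

def gps_dict_arr2 (gps_track_arr : List String) : List (List (String × String)) :=
  ((gps_track_arr.foldl pvStepA ([], PySem.Dict.empty)).1
    ++ [(gps_track_arr.foldl pvStepA ([], PySem.Dict.empty)).2]).map PySem.Dict.items

-- ===== PORT B =====
def pvLastB (i : String) : String := PySem.List.pyGetD ((PySem.Str.split? i ": ").getD []) (-1) ""

-- the ordered (substring, key) table of Source B (8 entries, delimiter first)
def pvTable : List (String × String) :=
  [("GPS Date/Time", "date/time"), ("GPS Latitude", "latitude"),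
   ("GPS Longitude", "longitude"), ("Altitude", "altitude"),
   ("GPS Speed Ref", "speed_ref"), ("GPS Speed", "speed"),
   ("GPS Track Ref", "track_ref"), ("GPS Track", "track")]

-- the inner for-break loop of parse: first matching table entry wins
def pvPutB (d : PySem.Dict String String) (line : String) : PySem.Dict String String :=
  match pvTable.find? (fun p => PySem.Str.find line p.1 != -1) with
  | some p => d.insert p.2 (pvLastB line)
  | none => d

-- parse(segment)
def pvParse (seg : List String) : PySem.Dict String String :=
  seg.foldl pvPutB PySem.Dict.empty

-- marks = [k for k, line in enumerate(...) if "GPS Date/Time" in line]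
def pvMarks (l : List String) : List Int :=
  (PySem.List.enumerate l).filterMap
    (fun p => if (PySem.Str.find p.2 "GPS Date/Time" != -1) = true then some p.1 else none)

def gps_dict_arr2_alt (gps_track_arr : List String) : List (List (String × String)) :=
  let marks := pvMarks gps_track_arr
  if marks = [] then [(pvParse gps_track_arr).items]
  else
    let bounds := marks ++ [(gps_track_arr.length : Int)]
    ((bounds.zip bounds.tail).map
      (fun ab => pvParse (PySem.List.slice gps_track_arr (some ab.1) (some ab.2)))).map
      PySem.Dict.items

-- ===== PRECONDITION & SPEC =====
def Spec_gps_dict_arr2 (gps_track_arr : List String) (out : List (List (String × String))) : Prop := out = gps_dict_arr2_alt gps_track_arr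
instance (gps_track_arr : List String) (out : List (List (String × String))) : Decidable (Spec_gps_dict_arr2 gps_track_arr out) := by unfold Spec_gps_dict_arr2; infer_instance

-- ===== CLAIM (what is proved, stated in full; the proofs are below) =====
def Claim_equal_gps_dict_arr2 : Prop := ∀ (gps_track_arr : List String), Dom_gps_dict_arr2 gps_track_arr → Spec_gps_dict_arr2 gps_track_arr (gps_dict_arr2 gps_track_arr)

-- ===== LEMMAS AND PROOFS =====

-- proof-side vocabulary: A's behaviour characterised by a recursive segmentation
def pvFields : List (String × String) := pvTable.tail

def pvPut (d : PySem.Dict String String) (line : String) : PySem.Dict String String :=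
  match pvFields.find? (fun p => PySem.Str.find line p.1 != -1) with
  | some p => d.insert p.2 (pvLastB line)
  | none => d

def pvSkip : List String → List String
  | [] => []
  | x :: xs => if (PySem.Str.find x "GPS Date/Time" != -1) = true then x :: xs else pvSkip xs

def pvRecord (d : PySem.Dict String String) : List String → PySem.Dict String String × List String
  | [] => (d, [])
  | x :: xs =>
    if (PySem.Str.find x "GPS Date/Time" != -1) = true then (d, x :: xs)
    else pvRecord (pvPut d x) xs

theorem pvRecord_length (d : PySem.Dict String String) (l : List String) :
    (pvRecord d l).2.length ≤ l.length := by
  induction l generalizing d with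
  | nil => simp [pvRecord]
  | cons x xs ih =>
    simp only [pvRecord]
    split
    · simp
    · exact le_trans (ih _) (by simp)

def pvRecords : List String → List (PySem.Dict String String)
  | [] => []
  | x :: xs =>
    let r := pvRecord (PySem.Dict.empty.insert "date/time" (pvLastB x)) xs
    r.1 :: pvRecords r.2
termination_by l => l.length
decreasing_by
  exact Nat.lt_succ_of_le (pvRecord_length _ xs)

theorem pvLast_eq (x : String) : pvLastB x = pvLastA x := rfl

-- On a non-delimiter line A's elif chain is exactly the 7-entry table dispatch.
theorem pvStepA_eq_put (arr : List (PySem.Dict String String)) (d : PySem.Dict String String)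
    (i : String) (h : (PySem.Str.find i "GPS Date/Time" != -1) = false) :
    pvStepA (arr, d) i = (arr, pvPut d i) := by
  unfold pvStepA pvPut pvFields pvTable
  rw [if_neg (by rw [h]; exact Bool.false_ne_true)]
  simp only [List.tail, List.find?]
  cases h1 : (PySem.Str.find i "GPS Latitude" != -1) <;>
  cases h2 : (PySem.Str.find i "GPS Longitude" != -1) <;>
  cases h3 : (PySem.Str.find i "Altitude" != -1) <;>
  cases h4 : (PySem.Str.find i "GPS Speed Ref" != -1) <;>
  cases h5 : (PySem.Str.find i "GPS Speed" != -1) <;>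
  cases h6 : (PySem.Str.find i "GPS Track Ref" != -1) <;>
  cases h7 : (PySem.Str.find i "GPS Track" != -1) <;> rfl

-- pvPut never touches the "date/time" key.
theorem pvPut_get_dt (d : PySem.Dict String String) (i : String) :
    (pvPut d i).get? "date/time" = d.get? "date/time" := by
  unfold pvPut
  cases h : pvFields.find? (fun p => PySem.Str.find i p.1 != -1) with
  | none => rfl
  | some p =>
    have hmem := List.mem_of_find?_eq_some h
    simp only [pvFields, pvTable, List.tail, List.mem_cons, List.not_mem_nil, or_false] at hmem
    rcases hmem with rfl | rfl | rfl | rfl | rfl | rfl | rfl <;>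
      simp [PySem.Dict.get?_insert]

-- B's table dispatch on the two kinds of lines
theorem pvPutB_delim (d : PySem.Dict String String) (x : String)
    (h : (PySem.Str.find x "GPS Date/Time" != -1) = true) :
    pvPutB d x = d.insert "date/time" (pvLastB x) := by
  unfold pvPutB pvTable
  simp only [List.find?, h]

theorem pvPutB_nd (d : PySem.Dict String String) (x : String)
    (h : (PySem.Str.find x "GPS Date/Time" != -1) = false) :
    pvPutB d x = pvPut d x := by
  unfold pvPutB pvPut pvFields pvTable
  simp only [List.tail, List.find?, h]

theorem pvFold_nd (l : List String) (d : PySem.Dict String String)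
    (h : ∀ y ∈ l, (PySem.Str.find y "GPS Date/Time" != -1) = false) :
    l.foldl pvPutB d = l.foldl pvPut d := by
  induction l generalizing d with
  | nil => rfl
  | cons x xs ih =>
    simp only [List.foldl_cons]
    rw [pvPutB_nd d x (h x (List.mem_cons_self))]
    exact ih _ (fun y hy => h y (List.mem_cons_of_mem _ hy))

-- A's fold, once a delimiter has been seen, produces B's record segmentation.
theorem pvFold_rec (l : List String) (d : PySem.Dict String String)
    (arr : List (PySem.Dict String String)) (hd : d.get? "date/time" ≠ none) :
    (l.foldl pvStepA (arr, d)).1 ++ [(l.foldl pvStepA (arr, d)).2] =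
      arr ++ (pvRecord d l).1 :: pvRecords (pvRecord d l).2 := by
  induction l generalizing d arr with
  | nil => simp [pvRecord, pvRecords]
  | cons x xs ih =>
    cases hx : (PySem.Str.find x "GPS Date/Time" != -1) with
    | false =>
      have hxne : ¬ ((PySem.Str.find x "GPS Date/Time" != -1) = true) := by
        rw [hx]; exact Bool.false_ne_true
      have hd' : (pvPut d x).get? "date/time" ≠ none := by rw [pvPut_get_dt]; exact hd
      have hr : pvRecord d (x :: xs) = pvRecord (pvPut d x) xs := by
        simp only [pvRecord]; rw [if_neg hxne]
      rw [hr, List.foldl_cons, pvStepA_eq_put arr d x hx]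
      exact ih (pvPut d x) arr hd'
    | true =>
      have hstep : pvStepA (arr, d) x =
          (arr ++ [d], PySem.Dict.empty.insert "date/time" (pvLastA x)) := by
        unfold pvStepA; rw [if_pos hx, if_pos hd]
      have hdt : (PySem.Dict.empty.insert "date/time" (pvLastA x)).get? "date/time" ≠ none := by
        rw [PySem.Dict.get?_insert_self]; simp
      have hrd : pvRecord d (x :: xs) = (d, x :: xs) := by
        simp only [pvRecord]; rw [if_pos hx]
      have hrecs : pvRecords (x :: xs) =
          (pvRecord (PySem.Dict.empty.insert "date/time" (pvLastB x)) xs).1 ::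
          pvRecords (pvRecord (PySem.Dict.empty.insert "date/time" (pvLastB x)) xs).2 := by
        rw [pvRecords]
      rw [List.foldl_cons, hstep, hrd, ih _ _ hdt, hrecs, pvLast_eq]
      simp

-- A's fold before any delimiter (the current dict lacks "date/time", nothing collected yet).
theorem pvFold_pre (l : List String) (d : PySem.Dict String String)
    (hd : d.get? "date/time" = none) :
    (l.foldl pvStepA (([] : List (PySem.Dict String String)), d)).1
      ++ [(l.foldl pvStepA (([] : List (PySem.Dict String String)), d)).2] =
    (match pvSkip l with
     | [] => [l.foldl pvPut d]
     | x :: xs => (pvRecord (PySem.Dict.empty.insert "date/time" (pvLastB x)) xs).1 ::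
         pvRecords (pvRecord (PySem.Dict.empty.insert "date/time" (pvLastB x)) xs).2) := by
  induction l generalizing d with
  | nil => simp [pvSkip]
  | cons x xs ih =>
    cases hx : (PySem.Str.find x "GPS Date/Time" != -1) with
    | false =>
      have hxne : ¬ ((PySem.Str.find x "GPS Date/Time" != -1) = true) := by
        rw [hx]; exact Bool.false_ne_true
      have hd' : (pvPut d x).get? "date/time" = none := by rw [pvPut_get_dt]; exact hd
      have hskip : pvSkip (x :: xs) = pvSkip xs := by
        simp only [pvSkip]; rw [if_neg hxne]
      rw [hskip, List.foldl_cons, pvStepA_eq_put [] d x hx,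
        show (x :: xs).foldl pvPut d = xs.foldl pvPut (pvPut d x) from rfl]
      exact ih (pvPut d x) hd'
    | true =>
      have hstep : pvStepA ([], d) x =
          ([], PySem.Dict.empty.insert "date/time" (pvLastA x)) := by
        unfold pvStepA; rw [if_pos hx, if_neg (by simp [hd])]
      have hdt : (PySem.Dict.empty.insert "date/time" (pvLastA x)).get? "date/time" ≠ none := by
        rw [PySem.Dict.get?_insert_self]; simp
      have hskip : pvSkip (x :: xs) = x :: xs := by
        simp only [pvSkip]; rw [if_pos hx]
      rw [hskip]
      show _ = (pvRecord (PySem.Dict.empty.insert "date/time" (pvLastB x)) xs).1 ::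
          pvRecords (pvRecord (PySem.Dict.empty.insert "date/time" (pvLastB x)) xs).2
      rw [List.foldl_cons, hstep, pvLast_eq]
      simpa using pvFold_rec xs (PySem.Dict.empty.insert "date/time" (pvLastA x)) [] hdt

-- Nat mirror of pvMarks
def pvMarksN : List String → List Nat
  | [] => []
  | x :: xs =>
    (if (PySem.Str.find x "GPS Date/Time" != -1) = true then [0] else [])
      ++ (pvMarksN xs).map (· + 1)

theorem pvMarks_enum (l : List String) (s : Int) :
    (PySem.List.enumerate l s).filterMap
        (fun p => if (PySem.Str.find p.2 "GPS Date/Time" != -1) = true then some p.1 else none)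
      = (pvMarksN l).map (fun n : Nat => s + (n : Int)) := by
  induction l generalizing s with
  | nil => simp [PySem.List.enumerate_nil, pvMarksN]
  | cons x xs ih =>
    rw [PySem.List.enumerate_cons]
    cases hx : (PySem.Str.find x "GPS Date/Time" != -1) with
    | false =>
      simp only [List.filterMap_cons, hx, Bool.false_eq_true, if_false, pvMarksN,
        List.nil_append]
      rw [ih (s + 1), List.map_map]
      congr 1; funext n
      simp only [Function.comp_apply]
      push_cast
      ring
    | true =>
      simp only [List.filterMap_cons, hx, if_true, pvMarksN, List.cons_append,
        List.nil_append, List.map_cons]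
      rw [ih (s + 1), List.map_map]
      refine List.cons_eq_cons.mpr ⟨by simp, ?_⟩
      congr 1; funext n
      simp only [Function.comp_apply]
      push_cast
      ring

theorem pvMarks_eq (l : List String) :
    pvMarks l = (pvMarksN l).map (fun n : Nat => (n : Int)) := by
  unfold pvMarks
  rw [pvMarks_enum l 0]
  congr 1; funext n; simp

-- heads of pvMarksN mark the first delimiter: the prefix is the nd-takeWhile
theorem pvMarksN_nil_iff (l : List String) :
    pvMarksN l = [] ↔ ∀ y ∈ l, (PySem.Str.find y "GPS Date/Time" != -1) = false := by
  induction l with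
  | nil => simp [pvMarksN]
  | cons x xs ih =>
    cases hx : (PySem.Str.find x "GPS Date/Time" != -1) with
    | true =>
      simp only [pvMarksN, List.mem_cons]
      rw [if_pos hx]
      constructor
      · intro h; simp at h
      · intro h; exact absurd (h x (Or.inl rfl)) (by rw [hx]; simp)
    | false =>
      simp only [pvMarksN, List.mem_cons]
      rw [if_neg (by rw [hx]; exact Bool.false_ne_true)]
      simp only [List.nil_append, List.map_eq_nil_iff, ih]
      constructor
      · intro h y hy; rcases hy with rfl | hy; exact hx; exact h y hy
      · intro h y hy; exact h y (Or.inr hy)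

theorem pvSkip_nil_iff (l : List String) :
    pvSkip l = [] ↔ ∀ y ∈ l, (PySem.Str.find y "GPS Date/Time" != -1) = false := by
  induction l with
  | nil => simp [pvSkip]
  | cons x xs ih =>
    cases hx : (PySem.Str.find x "GPS Date/Time" != -1) with
    | true =>
      simp only [pvSkip]
      rw [if_pos hx]
      constructor
      · intro h; simp at h
      · intro h; exact absurd (h x List.mem_cons_self) (by rw [hx]; simp)
    | false =>
      simp only [pvSkip]
      rw [if_neg (by rw [hx]; exact Bool.false_ne_true)]
      rw [ih]
      constructor
      · intro h y hy; rcases List.mem_cons.mp hy with rfl | hy'; exact hx; exact h y hy'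
      · intro h y hy; exact h y (List.mem_cons_of_mem _ hy)

theorem pvMarksN_head (l : List String) (m : Nat) (ms : List Nat)
    (h : pvMarksN l = m :: ms) :
    (∀ y ∈ l.take m, (PySem.Str.find y "GPS Date/Time" != -1) = false)
      ∧ l.drop m = pvSkip l := by
  induction l generalizing m ms with
  | nil => simp [pvMarksN] at h
  | cons x xs ih =>
    cases hx : (PySem.Str.find x "GPS Date/Time" != -1) with
    | true =>
      simp only [pvMarksN] at h
      rw [if_pos hx] at h
      simp only [List.cons_append, List.nil_append, List.cons.injEq] at h
      obtain ⟨rfl, _⟩ := h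
      refine ⟨by simp, ?_⟩
      simp only [List.drop_zero, pvSkip]; rw [if_pos hx]
    | false =>
      simp only [pvMarksN] at h
      rw [if_neg (by rw [hx]; exact Bool.false_ne_true)] at h
      simp only [List.nil_append] at h
      cases hm : pvMarksN xs with
      | nil => rw [hm] at h; simp at h
      | cons m' ms' =>
        rw [hm] at h
        simp only [List.map_cons, List.cons.injEq] at h
        obtain ⟨rfl, _⟩ := h
        obtain ⟨h1, h2⟩ := ih m' ms' hm
        refine ⟨?_, ?_⟩
        · intro y hy
          simp only [List.take_succ_cons, List.mem_cons] at hy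
          rcases hy with rfl | hy; exact hx; exact h1 y hy
        · simp only [List.drop_succ_cons, pvSkip]
          rw [if_neg (by rw [hx]; exact Bool.false_ne_true)]
          exact h2

-- pvRecord in terms of take/drop at the next delimiter
theorem pvRecord_take_drop (xs : List String) (m : Nat) (d : PySem.Dict String String)
    (h1 : ∀ y ∈ xs.take m, (PySem.Str.find y "GPS Date/Time" != -1) = false)
    (h2 : xs.drop m = pvSkip xs) :
    pvRecord d xs = ((xs.take m).foldl pvPut d, xs.drop m) := by
  induction m generalizing xs d with
  | zero =>
    simp only [List.take_zero, List.foldl_nil, List.drop_zero]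
    simp only [List.drop_zero] at h2
    cases xs with
    | nil => simp [pvRecord]
    | cons x xs' =>
      cases hx : (PySem.Str.find x "GPS Date/Time" != -1) with
      | true => simp only [pvRecord]; rw [if_pos hx]
      | false =>
        simp only [pvRecord]
        exfalso
        rw [show pvSkip (x :: xs') = pvSkip xs' by
          simp only [pvSkip]; rw [if_neg (by rw [hx]; exact Bool.false_ne_true)]] at h2
        have := congrArg List.length h2
        simp at this
        have hle : (pvSkip xs').length ≤ xs'.length := by
          clear this h2 h1
          induction xs' with
          | nil => simp [pvSkip]
          | cons z zs ihz =>
            simp only [pvSkip]; split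
            · simp
            · exact le_trans ihz (by simp)
        omega
  | succ m' ih =>
    cases xs with
    | nil => simp [pvRecord]
    | cons x xs' =>
      simp only [List.take_succ_cons, List.drop_succ_cons]
      have hx : (PySem.Str.find x "GPS Date/Time" != -1) = false :=
        h1 x (by simp)
      simp only [pvRecord]
      rw [if_neg (by rw [hx]; exact Bool.false_ne_true)]
      have h2' : xs'.drop m' = pvSkip xs' := by
        simp only [List.drop_succ_cons] at h2
        rw [h2]
        simp only [pvSkip]; rw [if_neg (by rw [hx]; exact Bool.false_ne_true)]
      rw [ih xs' (pvPut d x) (fun y hy => h1 y (by simp [hy])) h2']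
      simp

-- shifting all bounds by one while consing a line shifts the segments
theorem pvShift (x : String) (l' : List String) (b : List Nat) :
    (((b.map (· + 1)).zip (b.map (· + 1)).tail).map
        (fun ab => pvParse (((x :: l').drop ab.1).take (ab.2 - ab.1))))
      = ((b.zip b.tail).map (fun ab => pvParse ((l'.drop ab.1).take (ab.2 - ab.1)))) := by
  rw [← List.map_tail, List.zip_map, List.map_map]
  congr 1; funext ab
  obtain ⟨a, c⟩ := ab
  show pvParse (List.take (c + 1 - (a + 1)) (List.drop (a + 1) (x :: l')))
      = pvParse (List.take (c - a) (List.drop a l'))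
  rw [List.drop_succ_cons, Nat.add_sub_add_right]

-- the Nat-level segmentation of B equals pvRecords ∘ pvSkip (unconditionally)
theorem pvSeg_eq (l : List String) :
    (((pvMarksN l ++ [l.length]).zip (pvMarksN l ++ [l.length]).tail).map
        (fun ab => pvParse ((l.drop ab.1).take (ab.2 - ab.1))))
      = pvRecords (pvSkip l) := by
  induction l with
  | nil => simp [pvMarksN, pvSkip, pvRecords]
  | cons x xs ih =>
    cases hx : (PySem.Str.find x "GPS Date/Time" != -1) with
    | false =>
      have hxne : ¬ ((PySem.Str.find x "GPS Date/Time" != -1) = true) := by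
        rw [hx]; exact Bool.false_ne_true
      have hm : pvMarksN (x :: xs) ++ [(x :: xs).length]
          = (pvMarksN xs ++ [xs.length]).map (· + 1) := by
        simp only [pvMarksN]
        rw [if_neg hxne]
        simp [List.map_append]
      have hskip : pvSkip (x :: xs) = pvSkip xs := by
        simp only [pvSkip]; rw [if_neg hxne]
      rw [hm, hskip, pvShift, ih]
    | true =>
      have hm : pvMarksN (x :: xs) ++ [(x :: xs).length]
          = 0 :: (pvMarksN xs ++ [xs.length]).map (· + 1) := by
        simp only [pvMarksN]
        rw [if_pos hx]
        simp [List.map_append]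
      have hskip : pvSkip (x :: xs) = x :: xs := by
        simp only [pvSkip]; rw [if_pos hx]
      have hrecs : pvRecords (x :: xs) =
          (pvRecord (PySem.Dict.empty.insert "date/time" (pvLastB x)) xs).1 ::
          pvRecords (pvRecord (PySem.Dict.empty.insert "date/time" (pvLastB x)) xs).2 := by
        rw [pvRecords]
      rw [hm, hskip, hrecs]
      cases hmx : pvMarksN xs with
      | nil =>
        have hall := (pvMarksN_nil_iff xs).mp hmx
        have hrec : pvRecord (PySem.Dict.empty.insert "date/time" (pvLastB x)) xs
            = (xs.foldl pvPut (PySem.Dict.empty.insert "date/time" (pvLastB x)), []) := by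
          have := pvRecord_take_drop xs xs.length
            (PySem.Dict.empty.insert "date/time" (pvLastB x))
            (by simpa using hall)
            (by rw [(pvSkip_nil_iff xs).mpr hall, List.drop_length])
          simpa using this
        rw [hrec]
        simp only [List.nil_append, List.map_cons, List.map_nil, List.tail_cons,
          List.zip_cons_cons, List.zip_nil_right, List.map_nil]
        rw [show pvRecords [] = [] from by rw [pvRecords]]
        simp only [List.drop_zero, Nat.sub_zero]
        rw [List.take_of_length_le (by simp)]
        unfold pvParse
        rw [List.foldl_cons, pvPutB_delim _ _ hx, pvFold_nd xs _ hall]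
      | cons m ms =>
        obtain ⟨h1, h2⟩ := pvMarksN_head xs m ms hmx
        have hrec := pvRecord_take_drop xs m
          (PySem.Dict.empty.insert "date/time" (pvLastB x)) h1 h2
        rw [hrec, h2]
        have hT : ((m :: ms) ++ [xs.length]).map (· + 1)
            = (m + 1) :: (ms ++ [xs.length]).map (· + 1) := by simp
        rw [hT, List.tail_cons, List.zip_cons_cons, List.map_cons]
        have htail : ((((m + 1) :: (ms ++ [xs.length]).map (· + 1)).zip
              ((ms ++ [xs.length]).map (· + 1))).map
              (fun ab => pvParse (((x :: xs).drop ab.1).take (ab.2 - ab.1))))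
            = pvRecords (pvSkip xs) := by
          have hzip : ((m + 1) :: (ms ++ [xs.length]).map (· + 1)).zip
                ((ms ++ [xs.length]).map (· + 1))
              = (((m :: ms) ++ [xs.length]).map (· + 1)).zip
                ((((m :: ms) ++ [xs.length]).map (· + 1)).tail) := by
            rw [hT, List.tail_cons]
          rw [hzip, pvShift, ← hmx]
          exact ih
        rw [htail]
        congr 1
        simp only [List.drop_zero, Nat.sub_zero, List.take_succ_cons]
        unfold pvParse
        rw [List.foldl_cons, pvPutB_delim _ _ hx, pvFold_nd (xs.take m) _ h1]

-- ===== VERDICT (by name: the statement is the Claim_ definition above) =====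
theorem gps_dict_arr2_spec : Claim_equal_gps_dict_arr2 := by
  intro l _
  unfold Spec_gps_dict_arr2 gps_dict_arr2
  have hA := pvFold_pre l PySem.Dict.empty (by simp)
  simp only [gps_dict_arr2_alt]
  rw [pvMarks_eq]
  cases hm : pvMarksN l with
  | nil =>
    have hall := (pvMarksN_nil_iff l).mp hm
    have hskip : pvSkip l = [] := (pvSkip_nil_iff l).mpr hall
    rw [hskip] at hA
    simp only [List.map_nil]
    rw [if_pos trivial]
    rw [hA]
    unfold pvParse
    rw [pvFold_nd l _ hall]
    rfl
  | cons m ms =>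
    have hne : List.map (fun n : Nat => (n : Int)) (m :: ms) ≠ [] := by simp
    rw [if_neg hne, ← hm]
    have hskipne : pvSkip l ≠ [] := by
      intro hcon
      have := (pvSkip_nil_iff l).mp hcon
      rw [(pvMarksN_nil_iff l).mpr this] at hm
      simp at hm
    obtain ⟨x, xs, hsx⟩ := List.exists_cons_of_ne_nil hskipne
    rw [hsx] at hA
    have hcast : (List.map (fun n : Nat => (n : Int)) (pvMarksN l) ++ [(l.length : Int)])
        = (pvMarksN l ++ [l.length]).map (fun n : Nat => (n : Int)) := by
      simp [List.map_append]
    rw [hcast, ← List.map_tail, List.zip_map, List.map_map]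
    have hmap : (((pvMarksN l ++ [l.length]).zip (pvMarksN l ++ [l.length]).tail).map
          (Prod.map (fun n : Nat => (n : Int)) (fun n : Nat => (n : Int)))).map
          (PySem.Dict.items ∘ fun ab => pvParse (PySem.List.slice l (some ab.1) (some ab.2)))
        = (((pvMarksN l ++ [l.length]).zip (pvMarksN l ++ [l.length]).tail).map
          (fun ab => pvParse ((l.drop ab.1).take (ab.2 - ab.1)))).map PySem.Dict.items := by
      rw [List.map_map, List.map_map]
      congr 1; funext ab
      obtain ⟨a, c⟩ := ab
      show PySem.Dict.items (pvParse (PySem.List.slice l (some (a : Int)) (some (c : Int))))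
          = PySem.Dict.items (pvParse (List.take (c - a) (List.drop a l)))
      rw [PySem.List.slice_natCast]
    rw [hmap, pvSeg_eq, hsx]
    rw [hA]
    rw [show pvRecords (x :: xs) =
        (pvRecord (PySem.Dict.empty.insert "date/time" (pvLastB x)) xs).1 ::
        pvRecords (pvRecord (PySem.Dict.empty.insert "date/time" (pvLastB x)) xs).2
      from by rw [pvRecords]]
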